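-- pv_equiv track=rewrite | github.com/MTG/JAAH | utils/recordingAttributes.py | estimateRecordingTime
-- ===== SOURCE A (Python) =====
-- def estimateRecordingTime(artistRelations):
--     beginDate = None
--     endDate = None
--     for rel in artistRelations:
--         if ('begin' in rel.keys() and (beginDate == None or beginDate > rel['begin'])):
--             beginDate = rel['begin']
--         if ('end' in rel.keys() and (endDate == None or endDate < rel['end'])):
--             endDate = rel['end']
--     if (beginDate != None):
--         year = beginDate[:4]
--     else:
--         year = None
--     return beginDate, endDate, year
-- ===== SOURCE B (Python) =====
-- def estimateRecordingTime(artistRelations):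
--     begins = sorted(rel['begin'] for rel in artistRelations if 'begin' in rel)
--     ends = sorted((rel['end'] for rel in artistRelations if 'end' in rel), reverse=True)
--     beginDate = begins[0] if begins else None
--     endDate = ends[0] if ends else None
--     year = beginDate[:4] if beginDate is not None else None
--     return beginDate, endDate, year
-- ===== Notes on version B (the rewrite author's own statement) =====
-- stated objective: alternative
-- what changed: Replaces the fused single-pass loop carrying two running extremes by a sort-then-pick strategy: collect and sort the 'begin' values ascending and the 'end' values descending, then take the head of each sorted list.
import Mathlib
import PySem

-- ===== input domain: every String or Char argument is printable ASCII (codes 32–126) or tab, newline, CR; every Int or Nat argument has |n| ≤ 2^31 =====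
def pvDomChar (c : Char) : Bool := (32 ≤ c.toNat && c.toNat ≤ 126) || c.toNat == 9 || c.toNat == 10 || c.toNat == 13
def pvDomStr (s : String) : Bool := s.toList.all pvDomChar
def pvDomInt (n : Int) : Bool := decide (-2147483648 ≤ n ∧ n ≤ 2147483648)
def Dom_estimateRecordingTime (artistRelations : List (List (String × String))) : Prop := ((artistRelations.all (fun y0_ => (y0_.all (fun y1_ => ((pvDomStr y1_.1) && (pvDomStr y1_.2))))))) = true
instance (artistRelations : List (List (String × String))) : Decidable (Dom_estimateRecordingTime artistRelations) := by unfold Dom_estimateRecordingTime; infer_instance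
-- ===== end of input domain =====

-- B replaces A's fused single-pass loop over running extremes by a sort-then-pick strategy
-- (sort begins ascending / ends descending, take each head): an alternative algorithm, not faster.

-- ===== PORT A =====
-- one fused loop over the relations, updating the running (beginDate, endDate) pair
def estimateRecordingTime (artistRelations : List (List (String × String))) : Option String × Option String × Option String :=
  let st := artistRelations.foldl
    (fun (st : Option String × Option String) rel =>
      let bd := match rel.lookup "begin" with
        | some v => match st.1 with
          | none => some v
          | some b => if b > v then some v else some b
        | none => st.1
      let ed := match rel.lookup "end" with
        | some v => match st.2 with
          | none => some v
          | some e => if e < v then some v else some e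
        | none => st.2
      (bd, ed))
    (none, none)
  let year := match st.1 with
    | some b => some (PySem.Str.slice b none (some 4))
    | none => none
  (st.1, st.2, year)

-- ===== PORT B =====
-- collect the projected values, sort (begins ascending, ends descending), take the heads
def estimateRecordingTime_alt (artistRelations : List (List (String × String))) : Option String × Option String × Option String :=
  let begins := PySem.List.sorted (artistRelations.filterMap (fun rel => rel.lookup "begin")) (fun x => x)
  let ends := PySem.List.sorted (artistRelations.filterMap (fun rel => rel.lookup "end")) (fun x => x) (reverse := true)
  let beginDate := begins.head?
  let endDate := ends.head?
  (beginDate, endDate, beginDate.map (fun b => PySem.Str.slice b none (some 4)))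

-- ===== PRECONDITION & SPEC =====
def Spec_estimateRecordingTime (artistRelations : List (List (String × String))) (out : Option String × Option String × Option String) : Prop := out = estimateRecordingTime_alt artistRelations
instance (artistRelations : List (List (String × String))) (out : Option String × Option String × Option String) : Decidable (Spec_estimateRecordingTime artistRelations out) := by unfold Spec_estimateRecordingTime; infer_instance

-- ===== CLAIM (what is proved, stated in full; the proofs are below) =====
def Claim_equal_estimateRecordingTime : Prop := ∀ (artistRelations : List (List (String × String))), Dom_estimateRecordingTime artistRelations → Spec_estimateRecordingTime artistRelations (estimateRecordingTime artistRelations)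

-- ===== LEMMAS AND PROOFS =====

-- A's per-element step on the begin component
def stepMin (bd : Option String) (v : String) : Option String :=
  match bd with
  | none => some v
  | some b => if b > v then some v else some b

-- A's per-element step on the end component
def stepMax (ed : Option String) (v : String) : Option String :=
  match ed with
  | none => some v
  | some e => if e < v then some v else some e

theorem stepMin_some (b v : String) : stepMin (some b) v = some (min b v) := by
  simp only [stepMin, min_def]
  rcases lt_trichotomy b v with h | h | h
  · simp [not_lt.mpr h.le, h.le]
  · simp [h]
  · simp [h, not_le.mpr h]

theorem stepMax_some (e v : String) : stepMax (some e) v = some (max e v) := by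
  simp only [stepMax, max_def]
  rcases lt_trichotomy e v with h | h | h
  · simp [h, h.le]
  · simp [h]
  · simp [not_lt.mpr h.le, not_le.mpr h]

-- the fused pair fold splits into two independent folds
theorem foldl_pair_split (l : List (List (String × String))) (a b : Option String) :
    l.foldl (fun (st : Option String × Option String) rel =>
      (match rel.lookup "begin" with
        | some v => stepMin st.1 v
        | none => st.1,
       match rel.lookup "end" with
        | some v => stepMax st.2 v
        | none => st.2)) (a, b)
    = (l.foldl (fun bd rel => match rel.lookup "begin" with
        | some v => stepMin bd v | none => bd) a,
       l.foldl (fun ed rel => match rel.lookup "end" with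
        | some v => stepMax ed v | none => ed) b) := by
  induction l generalizing a b with
  | nil => rfl
  | cons x t ih => simp [List.foldl_cons, ih]

-- a fold that looks a key up and skips misses is a fold over the filterMap
theorem foldl_lookup_filterMap (k : String) (step : Option String → String → Option String)
    (l : List (List (String × String))) (a : Option String) :
    l.foldl (fun acc rel => match rel.lookup k with
      | some v => step acc v | none => acc) a
    = (l.filterMap (fun rel => rel.lookup k)).foldl step a := by
  induction l generalizing a with
  | nil => rfl
  | cons x t ih =>
    cases hx : x.lookup k <;> simp [List.foldl_cons, hx, ih]

theorem foldl_stepMin_some (l : List String) (b : String) :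
    l.foldl stepMin (some b) = some (l.foldl min b) := by
  induction l generalizing b with
  | nil => rfl
  | cons x t ih => simp [List.foldl_cons, stepMin_some, ih]

theorem foldl_stepMax_some (l : List String) (e : String) :
    l.foldl stepMax (some e) = some (l.foldl max e) := by
  induction l generalizing e with
  | nil => rfl
  | cons x t ih => simp [List.foldl_cons, stepMax_some, ih]

theorem foldl_stepMin_none (l : List String) :
    l.foldl stepMin none = PySem.List.min? l (fun x => x) := by
  cases l with
  | nil => rfl
  | cons x t =>
    rw [List.foldl_cons, show stepMin none x = some x from rfl, foldl_stepMin_some,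
      PySem.List.min?_id_cons]

theorem foldl_stepMax_none (l : List String) :
    l.foldl stepMax none = PySem.List.max? l (fun x => x) := by
  cases l with
  | nil => rfl
  | cons x t =>
    rw [List.foldl_cons, show stepMax none x = some x from rfl, foldl_stepMax_some,
      PySem.List.max?_id_cons]

-- the head of the ascending sort is the minimum value
theorem sorted_head_eq_min? (l : List String) :
    (PySem.List.sorted l (fun x => x)).head? = PySem.List.min? l (fun x => x) := by
  cases hl : l with
  | nil => rfl
  | cons x t =>
    cases hs : PySem.List.sorted (x :: t) (fun x => x) with
    | nil => exact absurd ((PySem.List.sorted_eq_nil_iff _ _ _).mp hs) (by simp)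
    | cons m s =>
      cases hm : PySem.List.min? (x :: t) (fun y => y) with
      | none => exact absurd ((PySem.List.min?_eq_none_iff _ _).mp hm) (by simp)
      | some mn =>
        have hmem : m ∈ (x :: t : List String) :=
          (PySem.List.mem_sorted _ _ _ _).mp (by rw [hs]; exact List.mem_cons_self ..)
        have hmnmem : mn ∈ (x :: t : List String) := PySem.List.min?_mem hm
        have h1 : m ≤ mn := PySem.List.key_head_sorted_le _ _ hs mn hmnmem
        have h2 : mn ≤ m := PySem.List.min?_isMin hm m hmem
        simp [le_antisymm h1 h2]

-- the head of the descending sort is the maximum value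
theorem sorted_rev_head_eq_max? (l : List String) :
    (PySem.List.sorted l (fun x => x) (reverse := true)).head? = PySem.List.max? l (fun x => x) := by
  cases hl : l with
  | nil => rfl
  | cons x t =>
    cases hs : PySem.List.sorted (x :: t) (fun x => x) (reverse := true) with
    | nil => exact absurd ((PySem.List.sorted_eq_nil_iff _ _ _).mp hs) (by simp)
    | cons m s =>
      cases hm : PySem.List.max? (x :: t) (fun y => y) with
      | none => exact absurd ((PySem.List.max?_eq_none_iff _ _).mp hm) (by simp)
      | some mx =>
        have hmem : m ∈ (x :: t : List String) :=
          (PySem.List.mem_sorted _ _ _ _).mp (by rw [hs]; exact List.mem_cons_self ..)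
        have hmxmem : mx ∈ (x :: t : List String) := PySem.List.max?_mem hm
        have h1 : mx ≤ m := PySem.List.key_head_sorted_rev_ge _ _ hs mx hmxmem
        have h2 : m ≤ mx := PySem.List.max?_isMax hm m hmem
        simp [le_antisymm h2 h1]

-- ===== VERDICT (by name: the statement is the Claim_ definition above) =====
theorem estimateRecordingTime_spec : Claim_equal_estimateRecordingTime := by
  intro ars _
  show estimateRecordingTime ars = estimateRecordingTime_alt ars
  unfold estimateRecordingTime estimateRecordingTime_alt
  have h : (fun (st : Option String × Option String) (rel : List (String × String)) =>
      (match rel.lookup "begin" with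
        | some v => stepMin st.1 v
        | none => st.1,
       match rel.lookup "end" with
        | some v => stepMax st.2 v
        | none => st.2)) =
      (fun (st : Option String × Option String) rel =>
        (match rel.lookup "begin" with
          | some v => match st.1 with
            | none => some v
            | some b => if b > v then some v else some b
          | none => st.1,
         match rel.lookup "end" with
          | some v => match st.2 with
            | none => some v
            | some e => if e < v then some v else some e
          | none => st.2)) := by
    funext st rel; simp [stepMin, stepMax]
  rw [← h, foldl_pair_split, foldl_lookup_filterMap, foldl_lookup_filterMap,
    foldl_stepMin_none, foldl_stepMax_none, ← sorted_head_eq_min?, ← sorted_rev_head_eq_max?]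
  cases hb : (PySem.List.sorted (ars.filterMap (fun rel => rel.lookup "begin")) (fun x => x)).head? <;> simp [hb]
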